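-- pv_equiv track=rewrite | github.com/SaarShai/Primes-Equispaced | koyama-shared/scripts/ndc_gl2_full_test.py | multiplicative_mu_delta
-- ===== SOURCE A (Python) =====
-- def multiplicative_mu_delta(n, tau_dict):
--     """For Δ weight 12: μ_Δ(p) = -τ(p), μ_Δ(p²) = τ(p)² - p^{11}, higher = 0."""
--     if n == 1: return 1
--     res = 1
--     for p in sorted(tau_dict.keys()):
--         if n == 1: break
--         if n % p == 0:
--             k = 0
--             while n % p == 0: n //= p; k += 1
--             tp = tau_dict[p]
--             if k == 1: res *= -tp
--             elif k == 2: res *= (tp*tp - p**11)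
--             else: return 0
--     if n > 1: return 0
--     return res
-- ===== SOURCE B (Python) =====
-- def multiplicative_mu_delta(n, tau_dict):
--     """Trial-divide n itself (2, then odd candidates up to sqrt(n)) and look each
--     prime power q**k up in tau_dict, instead of dividing n by every sorted key."""
--     if n == 1:
--         return 1
--     res = 1
--     q = 2
--     while q * q <= n:
--         if n % q == 0:
--             k = 0
--             while n % q == 0:
--                 n //= q
--                 k += 1
--             if q not in tau_dict or k > 2:
--                 return 0
--             t = tau_dict[q]
--             res *= -t if k == 1 else t * t - q ** 11
--         q += 1 if q == 2 else 2
--     if n > 1: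
--         if n not in tau_dict:
--             return 0
--         res *= -tau_dict[n]
--     return res
-- ===== Notes on version B (the rewrite author's own statement) =====
-- stated objective: alternative
-- what changed: B factors n itself by trial division (2, then odd candidates up to sqrt(n)) and looks each prime power up in tau_dict, instead of A's scheme of sorting the dict keys and dividing n by every key in turn.
-- outside the precondition, e.g. on multiplicative_mu_delta(4, {4: 5}): A returns -5, B returns 0; on multiplicative_mu_delta(-8, {2: 1}): A returns 0, B returns 1; on multiplicative_mu_delta(-12, {2: 1, 3: 1}): A returns 2047, B returns 1
import Mathlib
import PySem

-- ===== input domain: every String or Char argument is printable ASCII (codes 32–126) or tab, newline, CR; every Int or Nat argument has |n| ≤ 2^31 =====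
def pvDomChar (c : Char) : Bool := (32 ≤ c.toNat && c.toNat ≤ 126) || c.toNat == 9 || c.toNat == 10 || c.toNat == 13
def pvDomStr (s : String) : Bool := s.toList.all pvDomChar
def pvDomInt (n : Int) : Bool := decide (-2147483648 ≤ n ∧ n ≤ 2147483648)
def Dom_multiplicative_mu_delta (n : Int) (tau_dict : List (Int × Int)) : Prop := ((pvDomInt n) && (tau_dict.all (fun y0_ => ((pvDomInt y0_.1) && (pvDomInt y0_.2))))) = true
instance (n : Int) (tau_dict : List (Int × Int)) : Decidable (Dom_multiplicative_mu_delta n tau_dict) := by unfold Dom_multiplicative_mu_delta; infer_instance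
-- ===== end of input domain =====

-- B replaces A's sort-the-keys-and-divide-by-each-key scheme by trial division of n itself
-- (alternative decomposition, not claimed faster); return values agree on Pre_.

-- ===== PORT A =====

-- both Pythons contain the identical inner loop `while n % q == 0: n //= q; k += 1`;
-- it is ported once, fuelled (the fuel passed at each use is sufficient on Pre_)
def pvDivOut : Nat → Int → Int → Int × Nat
  | 0, n, _ => (n, 0)
  | f + 1, n, p =>
    if PySem.Int.mod n p = 0 then
      let r := pvDivOut f (PySem.Int.floordiv n p) p
      (r.1, r.2 + 1)
    else (n, 0)

-- the `for p in sorted(tau_dict.keys())` loop of A, with `break` and the trailing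
-- `if n > 1: return 0; return res` folded into the list recursion
def pvALoop (d : PySem.Dict Int Int) : List Int → Int → Int → Int
  | [], n, res => if 1 < n then 0 else res
  | p :: rest, n, res =>
    if n = 1 then res            -- `break`, then `if n > 1` is false, return res
    else if PySem.Int.mod n p = 0 then
      let nk := pvDivOut n.natAbs n p
      let tp := d.getD p 0       -- tau_dict[p]; p is a key, so no KeyError
      if nk.2 = 1 then pvALoop d rest nk.1 (res * (-tp))
      else if nk.2 = 2 then pvALoop d rest nk.1 (res * (tp * tp - p ^ (11 : Nat)))
      else 0
    else pvALoop d rest n res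

def multiplicative_mu_delta (n : Int) (tau_dict : List (Int × Int)) : Int :=
  if n = 1 then 1
  else pvALoop (PySem.Dict.mk tau_dict)
    (PySem.List.sorted (PySem.Dict.keys (PySem.Dict.mk tau_dict)) (fun x => x)) n 1

-- ===== PORT B =====

-- B's trailing `if n > 1: if n not in tau_dict: return 0; res *= -tau_dict[n]; return res`
def pvBFinish (d : PySem.Dict Int Int) (n res : Int) : Int :=
  if 1 < n then
    match d.get? n with
    | none => 0
    | some t => res * (-t)
  else res

-- B's `while q*q <= n` loop, fuelled (the fuel passed below is sufficient on Pre_)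
def pvBLoop (d : PySem.Dict Int Int) : Nat → Int → Int → Int → Int
  | 0, _, n, res => pvBFinish d n res
  | f + 1, q, n, res =>
    if q * q ≤ n then
      if PySem.Int.mod n q = 0 then
        let nk := pvDivOut n.natAbs n q
        if d.contains q = false ∨ 2 < nk.2 then 0
        else
          let t := d.getD q 0
          pvBLoop d f (if q = 2 then q + 1 else q + 2) nk.1
            (res * (if nk.2 = 1 then -t else t * t - q ^ (11 : Nat)))
      else pvBLoop d f (if q = 2 then q + 1 else q + 2) n res
    else pvBFinish d n res

def multiplicative_mu_delta_alt (n : Int) (tau_dict : List (Int × Int)) : Int :=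
  if n = 1 then 1
  else pvBLoop (PySem.Dict.mk tau_dict) (2 * n.natAbs + 2) 2 n 1

-- ===== PRECONDITION & SPEC =====

-- μ_Δ is only specified on n ≥ 1 with a prime-indexed τ table. Pre_ admits n = 1 always, every
-- n ≥ 1 whose dividing keys are genuine primes, and every other n no key divides; it excludes
-- a key 0 (A raises ZeroDivisionError), n ≤ 0 with a dividing key (A diverges or its value
-- there is an accident of its divide-out loop), and composite or negative keys dividing n
-- (A happily divides n by a non-prime; both behaviours there are accidental).
def Pre_multiplicative_mu_delta (n : Int) (tau_dict : List (Int × Int)) : Prop :=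
  n = 1 ∨ ((n ≠ 0 ∨ PySem.Dict.keys (PySem.Dict.mk tau_dict) = []) ∧
    ∀ p ∈ PySem.Dict.keys (PySem.Dict.mk tau_dict),
      p ≠ 0 ∧ (p ∣ n → 1 ≤ n ∧ 2 ≤ p ∧ p.toNat.Prime))
instance (n : Int) (tau_dict : List (Int × Int)) : Decidable (Pre_multiplicative_mu_delta n tau_dict) := by
  unfold Pre_multiplicative_mu_delta; infer_instance

def pvWitness_multiplicative_mu_delta : Int × (List (Int × Int)) := (12, [(2, -24), (3, 252)])

def Spec_multiplicative_mu_delta (n : Int) (tau_dict : List (Int × Int)) (out : Int) : Prop := out = multiplicative_mu_delta_alt n tau_dict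
instance (n : Int) (tau_dict : List (Int × Int)) (out : Int) : Decidable (Spec_multiplicative_mu_delta n tau_dict out) := by unfold Spec_multiplicative_mu_delta; infer_instance

-- ===== CLAIM (what is proved, stated in full; the proofs are below) =====
def Claim_equal_multiplicative_mu_delta : Prop := ∀ (n : Int) (tau_dict : List (Int × Int)), Dom_multiplicative_mu_delta n tau_dict → Pre_multiplicative_mu_delta n tau_dict → Spec_multiplicative_mu_delta n tau_dict (multiplicative_mu_delta n tau_dict)

-- ===== LEMMAS AND PROOFS =====

-- the common mathematical description both loops are reduced to:
-- pvTerm d q k = the factor contributed by the prime power q^k; pvP d m = the full product;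
-- pvGood m K = every prime factor of m is listed in K with multiplicity at most 2
def pvTerm (d : PySem.Dict Int Int) (q : Int) (k : Nat) : Int :=
  if k = 1 then -(d.getD q 0) else (d.getD q 0) * (d.getD q 0) - q ^ (11 : Nat)

def pvP (d : PySem.Dict Int Int) (m : Nat) : Int :=
  ∏ p ∈ m.primeFactors, pvTerm d (p : Int) (m.factorization p)

def pvGood (m : Nat) (K : List Int) : Prop :=
  ∀ p ∈ m.primeFactors, ((p : Int) ∈ K) ∧ m.factorization p ≤ 2

lemma pvGood_one (K : List Int) : pvGood 1 K := by
  intro p hp; simp [Nat.primeFactors_one] at hp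

lemma pvP_one (d : PySem.Dict Int Int) : pvP d 1 = 1 := by
  simp [pvP, Nat.primeFactors_one]

lemma pvDivOut_spec : ∀ (f : Nat) (n p : Int), 2 ≤ p → 1 ≤ n → n.natAbs ≤ f →
    1 ≤ (pvDivOut f n p).1 ∧
    n.toNat = p.toNat ^ (pvDivOut f n p).2 * (pvDivOut f n p).1.toNat ∧
    ¬ (p.toNat ∣ (pvDivOut f n p).1.toNat) := by
  intro f
  induction f with
  | zero => intro n p hp hn hf; omega
  | succ f ih =>
    intro n p hp hn hf
    by_cases h : PySem.Int.mod n p = 0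
    · have hdvd : p ∣ n := (PySem.Int.mod_eq_zero_iff_dvd n p).mp h
      set m := PySem.Int.floordiv n p with hm
      have hpm : p * m = n := by
        rw [hm, PySem.Int.floordiv_eq_ediv_of_pos (by omega)]
        exact Int.mul_ediv_cancel' hdvd
      have hm1 : 1 ≤ m := by nlinarith
      have h2m : 2 * m ≤ n := by nlinarith
      have hfm : m.natAbs ≤ f := by omega
      have IH := ih m p hp hm1 hfm
      have hstep : pvDivOut (f+1) n p = ((pvDivOut f m p).1, (pvDivOut f m p).2 + 1) := by
        simp [pvDivOut, h, hm]
      rw [hstep]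
      refine ⟨IH.1, ?_, IH.2.2⟩
      have htn : n.toNat = p.toNat * m.toNat := by
        rw [← hpm]; exact Int.toNat_mul (by omega) (by omega)
      rw [htn, IH.2.1]; ring
    · have hnd : ¬ p ∣ n := fun hd => h ((PySem.Int.mod_eq_zero_iff_dvd n p).mpr hd)
      have : pvDivOut (f+1) n p = (n, 0) := by simp [pvDivOut, h]
      rw [this]
      refine ⟨hn, by simp, fun hd => hnd ?_⟩
      have := Int.natCast_dvd_natCast.mpr hd
      rwa [Int.toNat_of_nonneg (by omega), Int.toNat_of_nonneg (by omega)] at this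

lemma pvGood_cons (p : Int) (K : List Int) (M : Nat)
    (h : ∀ r ∈ M.primeFactors, (r : Int) ≠ p) : pvGood M (p :: K) ↔ pvGood M K := by
  constructor
  · intro hg r hr
    rcases hg r hr with ⟨hmem, hle⟩
    rcases List.mem_cons.mp hmem with he | hm
    · exact absurd he (h r hr)
    · exact ⟨hm, hle⟩
  · intro hg r hr
    exact ⟨List.mem_cons_of_mem _ (hg r hr).1, (hg r hr).2⟩

lemma pvStep (d : PySem.Dict Int Int) (K : List Int) (Q k M' : Nat)
    (hq : Q.Prime) (hk : 1 ≤ k) (h1 : 0 < M') (hnd : ¬ Q ∣ M') :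
    (pvGood (Q ^ k * M') K ↔ ((Q : Int) ∈ K ∧ k ≤ 2 ∧ pvGood M' K)) ∧
    pvP d (Q ^ k * M') = pvTerm d (Q : Int) k * pvP d M' := by
  have hQ0 : Q ≠ 0 := hq.ne_zero
  have hpow : Q ^ k ≠ 0 := pow_ne_zero _ hQ0
  have hfact : (Q ^ k * M').factorization = Finsupp.single Q k + M'.factorization := by
    rw [Nat.factorization_mul hpow h1.ne', Nat.Prime.factorization_pow hq]
  have hself : (Q ^ k * M').factorization Q = k := by
    rw [hfact]; simp [Nat.factorization_eq_zero_of_not_dvd hnd]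
  have hother : ∀ r : Nat, r ≠ Q → (Q ^ k * M').factorization r = M'.factorization r := by
    intro r hr; rw [hfact]; simp [Ne.symm hr]
  have hpf : (Q ^ k * M').primeFactors = insert Q M'.primeFactors := by
    rw [Nat.primeFactors_mul hpow h1.ne', Nat.primeFactors_pow Q (by omega),
      hq.primeFactors, Finset.singleton_union]
  have hqnot : Q ∉ M'.primeFactors := fun hc => hnd (Nat.dvd_of_mem_primeFactors hc)
  constructor
  · constructor
    · intro hg
      have hQm := hg Q (by rw [hpf]; exact Finset.mem_insert_self _ _)
      refine ⟨hQm.1, hself ▸ hQm.2, ?_⟩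
      intro r hr
      have hrne : r ≠ Q := fun he => hqnot (he ▸ hr)
      have := hg r (by rw [hpf]; exact Finset.mem_insert_of_mem hr)
      exact ⟨this.1, by rw [← hother r hrne]; exact this.2⟩
    · rintro ⟨hQK, hk2, hg⟩ r hr
      rw [hpf] at hr
      rcases Finset.mem_insert.mp hr with he | hm
      · subst he; exact ⟨hQK, by rw [hself]; exact hk2⟩
      · have hrne : r ≠ Q := fun he => hqnot (he ▸ hm)
        exact ⟨(hg r hm).1, (hother r hrne) ▸ (hg r hm).2⟩
  · unfold pvP
    rw [hpf, Finset.prod_insert hqnot, hself]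
    congr 1
    refine Finset.prod_congr rfl (fun r hr => ?_)
    have hrne : r ≠ Q := fun he => hqnot (he ▸ hr)
    rw [hother r hrne]

lemma pvGood_not_of_ge_two (M : Nat) (h2 : 2 ≤ M) : ¬ pvGood M [] := by
  intro hg
  have hm : M.minFac ∈ M.primeFactors :=
    Nat.Prime.mem_primeFactors (Nat.minFac_prime (by omega)) (Nat.minFac_dvd M) (by omega)
  simpa using (hg _ hm).1

lemma pvLeftover (M Q : Nat) (h1 : 1 ≤ M) (hf : ∀ r : Nat, r.Prime → r ∣ M → Q ≤ r)
    (hq : M < Q * Q) : M = 1 ∨ M.Prime := by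
  by_cases hM1 : M = 1
  · exact Or.inl hM1
  · right
    by_contra hnp
    have hmf : M.minFac.Prime := Nat.minFac_prime hM1
    have hle := hf _ hmf (Nat.minFac_dvd M)
    have hsq := Nat.minFac_sq_le_self (by omega) hnp
    have : Q * Q ≤ M.minFac * M.minFac := Nat.mul_le_mul hle hle
    nlinarith [sq M.minFac]

lemma pvALoop_spec (d : PySem.Dict Int Int) : ∀ (ps : List Int) (n res : Int), 1 ≤ n →
    (∀ p ∈ ps, p ≠ 0 ∧ (p ∣ n → 2 ≤ p ∧ p.toNat.Prime)) →
    (pvGood n.toNat ps → pvALoop d ps n res = res * pvP d n.toNat) ∧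
    (¬ pvGood n.toNat ps → pvALoop d ps n res = 0) := by
  intro ps
  induction ps with
  | nil =>
    intro n res hn _
    by_cases h1 : n = 1
    · subst h1
      constructor
      · intro _; simp [pvALoop, pvP_one]
      · intro hng; exact absurd (pvGood_one []) hng
    · have h2 : 1 < n := by omega
      constructor
      · intro hg
        exact absurd hg (pvGood_not_of_ge_two n.toNat (by omega))
      · intro _; simp [pvALoop, h2]
  | cons p rest ih =>
    intro n res hn hps
    by_cases h1 : n = 1
    · subst h1
      constructor
      · intro _; simp [pvALoop, pvP_one]
      · intro hng; exact absurd (pvGood_one _) hng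
    · have hn2 : 2 ≤ n := by omega
      have hA : pvALoop d (p :: rest) n res =
          (if PySem.Int.mod n p = 0 then
            let nk := pvDivOut n.natAbs n p
            let tp := d.getD p 0
            if nk.2 = 1 then pvALoop d rest nk.1 (res * (-tp))
            else if nk.2 = 2 then pvALoop d rest nk.1 (res * (tp * tp - p ^ (11 : Nat)))
            else 0
          else pvALoop d rest n res) := by
        simp [pvALoop, h1]
      by_cases hd : PySem.Int.mod n p = 0
      · have hdvd : p ∣ n := (PySem.Int.mod_eq_zero_iff_dvd n p).mp hd
        obtain ⟨hp2, hprime⟩ := (hps p (List.mem_cons_self)).2 hdvd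
        set nk := pvDivOut n.natAbs n p with hnk
        obtain ⟨hm1, heq, hnd⟩ := pvDivOut_spec n.natAbs n p hp2 hn le_rfl
        rw [← hnk] at hm1 heq hnd
        have hpcast : ((p.toNat : Int)) = p := Int.toNat_of_nonneg (by omega)
        have hQdvdM : p.toNat ∣ n.toNat := by
          rcases hdvd with ⟨c, hc⟩
          refine ⟨c.toNat, ?_⟩
          rw [← Int.toNat_mul (by omega) (by nlinarith), ← hc]
        have hk1 : 1 ≤ nk.2 := by
          rcases Nat.eq_zero_or_pos nk.2 with h0 | h
          · rw [h0, pow_zero, one_mul] at heq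
            exact absurd (heq ▸ hQdvdM) hnd
          · exact h
        have hstep := pvStep d (p :: rest) p.toNat nk.2 nk.1.toNat hprime hk1 (by omega) hnd
        have hMeq : p.toNat ^ nk.2 * nk.1.toNat = n.toNat := heq.symm
        -- divisibility of new value by rest's elements implies old
        have hdvd' : (nk.1 : Int) ∣ n := by
          have : nk.1.toNat ∣ n.toNat := Dvd.intro_left _ hMeq
          have hcast := Int.natCast_dvd_natCast.mpr this
          rwa [Int.toNat_of_nonneg (by omega), Int.toNat_of_nonneg (by omega)] at hcast
        have hps' : ∀ q ∈ rest, q ≠ 0 ∧ (q ∣ nk.1 → 2 ≤ q ∧ q.toNat.Prime) := by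
          intro q hq
          refine ⟨(hps q (List.mem_cons_of_mem _ hq)).1, fun hqd => ?_⟩
          exact (hps q (List.mem_cons_of_mem _ hq)).2 (hqd.trans hdvd')
        have ihh := ih nk.1 -- applied with the right res later
        -- transfer pvGood over cons for the new value
        have hcons : ∀ K : List Int, pvGood nk.1.toNat (p :: K) ↔ pvGood nk.1.toNat K := by
          intro K
          refine pvGood_cons p K nk.1.toNat (fun r hr he => ?_)
          have : r = p.toNat := by omega
          exact hnd (this ▸ Nat.dvd_of_mem_primeFactors hr)
        have hGoodIff : pvGood n.toNat (p :: rest) ↔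
            ((p.toNat : Int) ∈ (p :: rest) ∧ nk.2 ≤ 2 ∧ pvGood nk.1.toNat rest) := by
          rw [← hMeq] at *
          rw [hstep.1, hcons rest]
        have hPeq : pvP d n.toNat = pvTerm d p nk.2 * pvP d nk.1.toNat := by
          rw [← hMeq, hstep.2, hpcast]
        rw [hA, if_pos hd]
        by_cases hk2 : nk.2 = 1
        · rw [if_pos hk2]
          have IH := ih nk.1 (res * (-(d.getD p 0))) hm1 hps'
          constructor
          · intro hg
            have hg' := (hGoodIff.mp hg).2.2
            rw [IH.1 hg', hPeq]
            simp [pvTerm, hk2]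
            ring
          · intro hng
            by_cases hg' : pvGood nk.1.toNat rest
            · exfalso
              exact hng (hGoodIff.mpr ⟨by rw [hpcast]; exact List.mem_cons_self, by omega, hg'⟩)
            · exact IH.2 hg'
        · by_cases hk22 : nk.2 = 2
          · rw [if_neg hk2, if_pos hk22]
            have IH := ih nk.1 (res * (d.getD p 0 * d.getD p 0 - p ^ (11 : Nat))) hm1 hps'
            constructor
            · intro hg
              have hg' := (hGoodIff.mp hg).2.2
              rw [IH.1 hg', hPeq]
              simp [pvTerm, hk22]
              ring
            · intro hng
              by_cases hg' : pvGood nk.1.toNat rest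
              · exfalso
                exact hng (hGoodIff.mpr ⟨by rw [hpcast]; exact List.mem_cons_self, by omega, hg'⟩)
              · exact IH.2 hg'
          · -- k ≥ 3 : return 0, pvGood fails
            rw [if_neg hk2, if_neg hk22]
            have hnotg : ¬ pvGood n.toNat (p :: rest) := by
              intro hg
              have := (hGoodIff.mp hg).2.1
              omega
            exact ⟨fun hg => absurd hg hnotg, fun _ => rfl⟩
      · -- p does not divide n : skip
        have hnd : ¬ p ∣ n := fun hdd => hd ((PySem.Int.mod_eq_zero_iff_dvd n p).mpr hdd)
        have hcons : pvGood n.toNat (p :: rest) ↔ pvGood n.toNat rest := by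
          refine pvGood_cons p rest n.toNat (fun r hr he => ?_)
          apply hnd
          have hrd := Nat.dvd_of_mem_primeFactors hr
          have hcast := Int.natCast_dvd_natCast.mpr hrd
          rw [Int.toNat_of_nonneg (by omega)] at hcast
          rwa [he] at hcast
        have IH := ih n res hn (fun q hq => hps q (List.mem_cons_of_mem _ hq))
        rw [hA, if_neg hd]
        exact ⟨fun hg => IH.1 (hcons.mp hg), fun hng => IH.2 (fun hg => hng (hcons.mpr hg))⟩

lemma pvBFinish_spec (d : PySem.Dict Int Int) (n res : Int) (h1 : 1 ≤ n)
    (hmp : n.toNat = 1 ∨ n.toNat.Prime) :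
    (pvGood n.toNat (PySem.Dict.keys d) → pvBFinish d n res = res * pvP d n.toNat) ∧
    (¬ pvGood n.toNat (PySem.Dict.keys d) → pvBFinish d n res = 0) := by
  rcases hmp with hone | hpr
  · have hn1 : n = 1 := by omega
    subst hn1
    constructor
    · intro _; simp [pvBFinish, pvP_one]
    · intro hng; exact absurd (pvGood_one _) hng
  · have hn2 : 1 < n := by
      rcases (Nat.Prime.two_le hpr) with _
      omega
    have hpf : n.toNat.primeFactors = {n.toNat} := hpr.primeFactors
    have hfs : n.toNat.factorization n.toNat = 1 := Nat.Prime.factorization_self hpr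
    have hcast : ((n.toNat : Int)) = n := Int.toNat_of_nonneg (by omega)
    have hB : pvBFinish d n res = (match d.get? n with
        | none => 0
        | some t => res * (-t)) := by
      simp [pvBFinish, hn2]
    cases hget : d.get? n with
    | none =>
      have hnk : n ∉ PySem.Dict.keys d := (PySem.Dict.get?_eq_none_iff_not_mem_keys d n).mp hget
      have hng : ¬ pvGood n.toNat (PySem.Dict.keys d) := by
        intro hg
        have := (hg n.toNat (by rw [hpf]; exact Finset.mem_singleton_self _)).1
        rw [hcast] at this
        exact hnk this
      exact ⟨fun hg => absurd hg hng, fun _ => by rw [hB, hget]⟩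
    | some t =>
      have hnk : n ∈ PySem.Dict.keys d := by
        by_contra hc
        rw [(PySem.Dict.get?_eq_none_iff_not_mem_keys d n).mpr hc] at hget
        simp at hget
      have hgd : d.getD n 0 = t := by
        rw [PySem.Dict.getD_eq_get?_getD, hget]; rfl
      have hg : pvGood n.toNat (PySem.Dict.keys d) := by
        intro r hr
        rw [hpf, Finset.mem_singleton] at hr
        subst hr
        exact ⟨by rw [hcast]; exact hnk, by rw [hfs]; omega⟩
      have hP : pvP d n.toNat = -t := by
        rw [pvP, hpf, Finset.prod_singleton, hfs, pvTerm, if_pos rfl, hcast, hgd]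
      exact ⟨fun _ => by rw [hB, hget, hP], fun hng => absurd hg hng⟩

lemma pvBLoop_spec (d : PySem.Dict Int Int) : ∀ (f : Nat) (q n res : Int), 1 ≤ n → 2 ≤ q →
    (q = 2 ∨ (3 ≤ q ∧ q % 2 = 1)) →
    (∀ r : Nat, r.Prime → r ∣ n.toNat → q.toNat ≤ r) →
    2 * n.toNat + 2 ≤ f + q.toNat →
    (pvGood n.toNat (PySem.Dict.keys d) → pvBLoop d f q n res = res * pvP d n.toNat) ∧
    (¬ pvGood n.toNat (PySem.Dict.keys d) → pvBLoop d f q n res = 0) := by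
  intro f
  induction f with
  | zero =>
    intro q n res hn hq _ hsmall hfuel
    have hbig : ¬ (q * q ≤ n) := by
      intro hc
      have h1 : (q.toNat : Int) = q := Int.toNat_of_nonneg (by omega)
      have h2 : (n.toNat : Int) = n := Int.toNat_of_nonneg (by omega)
      nlinarith [hfuel]
    have : n.toNat < q.toNat * q.toNat := by
      by_contra hc
      push_neg at hc
      apply hbig
      have h1 : (q.toNat : Int) = q := Int.toNat_of_nonneg (by omega)
      have h2 : (n.toNat : Int) = n := Int.toNat_of_nonneg (by omega)
      have := Nat.cast_le (α := Int) |>.mpr hc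
      push_cast at this
      rw [h1, h2] at this
      nlinarith
    exact pvBFinish_spec d n res hn (pvLeftover n.toNat q.toNat (by omega : 1 ≤ n.toNat) hsmall this)
  | succ f ih =>
    intro q n res hn hq hsh hsmall hfuel
    have hpcast : ((q.toNat : Int)) = q := Int.toNat_of_nonneg (by omega)
    have hncast : ((n.toNat : Int)) = n := Int.toNat_of_nonneg (by omega)
    -- the next candidate and its properties
    have hq'2 : 2 ≤ (if q = 2 then q + 1 else q + 2) := by split_ifs <;> omega
    have hq't : q.toNat + 1 ≤ (if q = 2 then q + 1 else q + 2).toNat := by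
      split_ifs <;> omega
    have hsh' : (if q = 2 then q + 1 else q + 2) = 2 ∨
        (3 ≤ (if q = 2 then q + 1 else q + 2) ∧ (if q = 2 then q + 1 else q + 2) % 2 = 1) := by
      rcases hsh with h2 | ⟨h3, hodd⟩
      · right; rw [if_pos h2, h2]; omega
      · right; rw [if_neg (by omega)]; omega
    have hparity : ∀ r : Nat, r.Prime → q.toNat ≤ r → r ≠ q.toNat →
        (if q = 2 then q + 1 else q + 2).toNat ≤ r := by
      intro r hrp h5 hrne
      have hr2 := hrp.two_le
      by_cases h2 : q = 2
      · rw [if_pos h2]; subst h2; omega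
      · rw [if_neg h2]
        have hodd : q % 2 = 1 := by
          rcases hsh with he | he
          · exact absurd he h2
          · exact he.2
        by_cases hre : r = q.toNat + 1
        · exfalso
          have := (Nat.Prime.even_iff hrp).mp (Nat.even_iff.mpr (by omega))
          omega
        · omega
    by_cases hql : q * q ≤ n
    · by_cases hd : PySem.Int.mod n q = 0
      · have hdvd : q ∣ n := (PySem.Int.mod_eq_zero_iff_dvd n q).mp hd
        have hQdvd : q.toNat ∣ n.toNat := by
          rcases hdvd with ⟨c, hc⟩
          refine ⟨c.toNat, ?_⟩
          rw [← Int.toNat_mul (by omega) (by nlinarith), ← hc]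
        -- q has no factor of n below it, so q is prime
        have hqp : q.toNat.Prime := by
          have hmfp := Nat.minFac_prime (show q.toNat ≠ 1 by omega)
          have h5 := hsmall _ hmfp ((Nat.minFac_dvd _).trans hQdvd)
          have h6 := Nat.minFac_le (show 0 < q.toNat by omega)
          have heqm : q.toNat.minFac = q.toNat := le_antisymm h6 h5
          rw [← heqm]; exact hmfp
        set nk := pvDivOut n.natAbs n q with hnk
        obtain ⟨hm1, heq, hnd⟩ := pvDivOut_spec n.natAbs n q hq hn le_rfl
        rw [← hnk] at hm1 heq hnd
        have hk1 : 1 ≤ nk.2 := by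
          rcases Nat.eq_zero_or_pos nk.2 with h0 | h
          · rw [h0, pow_zero, one_mul] at heq
            exact absurd (heq ▸ hQdvd) hnd
          · exact h
        have hstep := pvStep d (PySem.Dict.keys d) q.toNat nk.2 nk.1.toNat hqp hk1 (by omega) hnd
        have hMeq : q.toNat ^ nk.2 * nk.1.toNat = n.toNat := heq.symm
        have hGoodIff : pvGood n.toNat (PySem.Dict.keys d) ↔
            ((q.toNat : Int) ∈ PySem.Dict.keys d ∧ nk.2 ≤ 2 ∧ pvGood nk.1.toNat (PySem.Dict.keys d)) := by
          rw [← hMeq]; exact hstep.1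
        have hPeq : pvP d n.toNat = pvTerm d q nk.2 * pvP d nk.1.toNat := by
          rw [← hMeq, hstep.2, hpcast]
        have hB : pvBLoop d (f + 1) q n res =
            (if d.contains q = false ∨ 2 < nk.2 then 0
             else pvBLoop d f (if q = 2 then q + 1 else q + 2) nk.1
               (res * (if nk.2 = 1 then -(d.getD q 0) else d.getD q 0 * d.getD q 0 - q ^ (11 : Nat)))) := by
          simp only [pvBLoop]
          rw [if_pos hql, if_pos hd, ← hnk]
        by_cases hzero : d.contains q = false ∨ 2 < nk.2
        · rw [hB, if_pos hzero]
          have hnotg : ¬ pvGood n.toNat (PySem.Dict.keys d) := by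
            intro hg
            rcases hGoodIff.mp hg with ⟨hmem, hk2, _⟩
            rcases hzero with hc | hk3
            · rw [← PySem.Dict.contains_iff_mem_keys, hpcast, hc] at hmem
              exact Bool.noConfusion hmem
            · omega
          exact ⟨fun hg => absurd hg hnotg, fun _ => rfl⟩
        · rw [hB, if_neg hzero]
          have hcont : d.contains q = true := by
            cases hc : d.contains q
            · exact absurd (Or.inl hc) hzero
            · rfl
          have hk2 : nk.2 ≤ 2 := by
            rcases Nat.lt_or_ge 2 nk.2 with h | h
            · exact absurd (Or.inr h) hzero
            · exact h
          have hmem : (q.toNat : Int) ∈ PySem.Dict.keys d := by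
            rw [hpcast]; exact (PySem.Dict.contains_iff_mem_keys d q).mp hcont
          have hsmall' : ∀ r : Nat, r.Prime → r ∣ nk.1.toNat →
              (if q = 2 then q + 1 else q + 2).toNat ≤ r := by
            intro r hrp hrd
            have hrdM : r ∣ n.toNat := hrd.trans (Dvd.intro_left _ hMeq)
            exact hparity r hrp (hsmall r hrp hrdM) (fun he => hnd (he ▸ hrd))
          have hfuel' : 2 * nk.1.toNat + 2 ≤ f + (if q = 2 then q + 1 else q + 2).toNat := by
            have hpk : 2 ≤ q.toNat ^ nk.2 :=
              le_trans (by omega) (Nat.le_self_pow (by omega) q.toNat)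
            have hM2 : 2 * nk.1.toNat ≤ n.toNat := by
              rw [← hMeq]; exact Nat.mul_le_mul_right _ hpk
            omega
          have IH := ih (if q = 2 then q + 1 else q + 2) nk.1
            (res * (if nk.2 = 1 then -(d.getD q 0) else d.getD q 0 * d.getD q 0 - q ^ (11 : Nat)))
            hm1 hq'2 hsh' hsmall' hfuel'
          constructor
          · intro hg
            rw [IH.1 ((hGoodIff.mp hg).2.2), hPeq]
            unfold pvTerm
            ring
          · intro hng
            refine IH.2 (fun hg' => hng (hGoodIff.mpr ⟨hmem, hk2, hg'⟩))
      · -- q does not divide n: move to the next candidate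
        have hndvd : ¬ q ∣ n := fun hdd => hd ((PySem.Int.mod_eq_zero_iff_dvd n q).mpr hdd)
        have hB : pvBLoop d (f + 1) q n res =
            pvBLoop d f (if q = 2 then q + 1 else q + 2) n res := by
          simp only [pvBLoop]
          rw [if_pos hql, if_neg hd]
        have hsmall' : ∀ r : Nat, r.Prime → r ∣ n.toNat →
            (if q = 2 then q + 1 else q + 2).toNat ≤ r := by
          intro r hrp hrd
          refine hparity r hrp (hsmall r hrp hrd) (fun he => hndvd ?_)
          subst he
          have hcast := Int.natCast_dvd_natCast.mpr hrd
          rwa [hpcast, hncast] at hcast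
        have IH := ih (if q = 2 then q + 1 else q + 2) n res hn hq'2 hsh' hsmall' (by omega)
        rw [hB]
        exact IH
    · -- loop exit: the leftover is 1 or prime
      have hB : pvBLoop d (f + 1) q n res = pvBFinish d n res := by
        simp only [pvBLoop]
        rw [if_neg hql]
      have hlt : n.toNat < q.toNat * q.toNat := by
        by_contra hc
        push_neg at hc
        apply hql
        have := Nat.cast_le (α := Int) |>.mpr hc
        push_cast at this
        rw [hpcast, hncast] at this
        linarith
      rw [hB]
      exact pvBFinish_spec d n res hn (pvLeftover n.toNat q.toNat (by omega) hsmall hlt)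

lemma pvALoop_skip (d : PySem.Dict Int Int) : ∀ (ps : List Int) (n res : Int), n ≤ 0 →
    (∀ p ∈ ps, p ≠ 0 ∧ ¬ p ∣ n) → pvALoop d ps n res = res := by
  intro ps
  induction ps with
  | nil => intro n res hn _; simp [pvALoop]; omega
  | cons p rest ih =>
    intro n res hn hps
    have hd : ¬ PySem.Int.mod n p = 0 := fun h =>
      (hps p List.mem_cons_self).2 ((PySem.Int.mod_eq_zero_iff_dvd n p).mp h)
    have h1 : n ≠ 1 := by omega
    simp only [pvALoop]
    rw [if_neg h1, if_neg hd]
    exact ih n res hn (fun q hq => hps q (List.mem_cons_of_mem _ hq))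

lemma pvGood_sorted (M : Nat) (K : List Int) :
    pvGood M (PySem.List.sorted K (fun x => x)) ↔ pvGood M K := by
  unfold pvGood
  constructor <;> intro h r hr <;>
    exact ⟨by have := (h r hr).1; simpa [PySem.List.mem_sorted] using this, (h r hr).2⟩

-- ===== VERDICT (by name: the statement is the Claim_ definition above) =====
theorem multiplicative_mu_delta_spec : Claim_equal_multiplicative_mu_delta := by
  intro n td _ hpre
  unfold Pre_multiplicative_mu_delta at hpre
  unfold Spec_multiplicative_mu_delta multiplicative_mu_delta multiplicative_mu_delta_alt
  set d := PySem.Dict.mk td with hd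
  by_cases h1 : n = 1
  · rw [if_pos h1, if_pos h1]
  · rw [if_neg h1, if_neg h1]
    rcases hpre with he | ⟨hz, hkeys⟩
    · exact absurd he h1
    by_cases hpos : 1 ≤ n
    · -- positive n ≥ 2
      have hA := pvALoop_spec d (PySem.List.sorted (PySem.Dict.keys d) (fun x => x)) n 1 hpos
        (by
          intro p hp
          have hm : p ∈ PySem.Dict.keys d := by
            rw [PySem.List.mem_sorted] at hp; exact hp
          exact ⟨(hkeys p hm).1, fun hdv => ⟨((hkeys p hm).2 hdv).2.1, ((hkeys p hm).2 hdv).2.2⟩⟩)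
      have hBs := pvBLoop_spec d (2 * n.natAbs + 2) 2 n 1 hpos (by omega) (Or.inl rfl)
        (fun r hr _ => hr.two_le) (by omega)
      by_cases hg : pvGood n.toNat (PySem.Dict.keys d)
      · rw [hA.1 ((pvGood_sorted _ _).mpr hg), hBs.1 hg]
      · rw [hA.2 (fun hgs => hg ((pvGood_sorted _ _).mp hgs)), hBs.2 hg]
    · -- n ≤ 0 (and n ≠ 1): no key divides n, both sides return 1
      have hneg : n ≤ 0 := by omega
      have hnz : n ≠ 0 ∨ PySem.Dict.keys d = [] := hz
      have hA : pvALoop d (PySem.List.sorted (PySem.Dict.keys d) (fun x => x)) n 1 = 1 := by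
        rcases hnz with hnz | hkeyse
        · apply pvALoop_skip d _ n 1 hneg
          intro p hp
          have hm : p ∈ PySem.Dict.keys d := by
            rw [PySem.List.mem_sorted] at hp; exact hp
          exact ⟨(hkeys p hm).1, fun hdv => by have := ((hkeys p hm).2 hdv).1; omega⟩
        · rw [hkeyse]
          have : PySem.List.sorted ([] : List Int) (fun x => x) = [] := rfl
          rw [this]
          simp [pvALoop]
          omega
      have hB : pvBLoop d (2 * n.natAbs + 2) 2 n 1 = 1 := by
        have hsucc : 2 * n.natAbs + 2 = (2 * n.natAbs + 1) + 1 := rfl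
        rw [hsucc]
        simp only [pvBLoop]
        rw [if_neg (by omega : ¬ (2 : Int) * 2 ≤ n)]
        unfold pvBFinish
        rw [if_neg (by omega)]
      rw [hA, hB]
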